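-- pv_equiv track=rewrite | github.com/lucasalavapena/leetcode | 0984-most-stones-removed-with-same-row-or-column/Python3/most-stones-removed-with-same-row-or-column_636603215.py | dsu_approach
-- ===== SOURCE A (Python) =====
-- class DSU:
--     def __init__(self, N):
--         self.pr = list(range(N))
--         self.connected_components = N
--
--     def find(self, x):
--         if self.pr[x] != x:
--             self.pr[x] = self.find(self.pr[x])
--         return self.pr[x]
--
--     def union(self, a, b):
--         x = self.find(a)
--         y = self.find(b)
--
--         if x == y:
--             return False
--         else:
--             self.connected_components -= 1
--             self.pr[y] = x
--             return True
--
-- def dsu_approach(stones):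
--     N = len(stones)
--
--     dsu = DSU(N)
--
--     m1 = {} # set for x axis
--     m2 = {} # set for y axis
--     for i in range(N):
--         if stones[i][0] not in m1:
--             m1[stones[i][0]] = i
--         if stones[i][1] not in m2:
--             m2[stones[i][1]] = i
--
--     for i, stone in enumerate(stones):
--         if m1[stone[0]] != i:
--             dsu.union(i, m1[stone[0]])
--         if m2[stone[1]] != i:
--             dsu.union(i, m2[stone[1]])
--
--     """
--     move_count = (n_in_connected_group1 -1) + (n_in_connected_group2 -1) + ..
--     stones- (1 + 1 + 1 )
--     stones - components
--     """
--     return N-dsu.connected_components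
-- ===== SOURCE B (Python) =====
-- def dsu_approach(stones):
--     N = len(stones)
--     rows = {}
--     cols = {}
--     for i in range(N):
--         rows.setdefault(stones[i][0], i)
--         cols.setdefault(stones[i][1], i)
--     comp = list(range(N))
--     for i, stone in enumerate(stones):
--         for j in (rows[stone[0]], cols[stone[1]]):
--             li, lj = comp[i], comp[j]
--             if li != lj:
--                 comp = [li if c == lj else c for c in comp]
--     return N - len(set(comp))
-- ===== Notes on version B (the rewrite author's own statement) =====
-- stated objective: alternative
-- what changed: Replaces A's union-find (parent array with path-compressing recursive find and a live component counter) by a quick-find label array: each merge rewrites one component label into the other across the array, and the answer is N minus the number of distinct labels at the end.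
import Mathlib
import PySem

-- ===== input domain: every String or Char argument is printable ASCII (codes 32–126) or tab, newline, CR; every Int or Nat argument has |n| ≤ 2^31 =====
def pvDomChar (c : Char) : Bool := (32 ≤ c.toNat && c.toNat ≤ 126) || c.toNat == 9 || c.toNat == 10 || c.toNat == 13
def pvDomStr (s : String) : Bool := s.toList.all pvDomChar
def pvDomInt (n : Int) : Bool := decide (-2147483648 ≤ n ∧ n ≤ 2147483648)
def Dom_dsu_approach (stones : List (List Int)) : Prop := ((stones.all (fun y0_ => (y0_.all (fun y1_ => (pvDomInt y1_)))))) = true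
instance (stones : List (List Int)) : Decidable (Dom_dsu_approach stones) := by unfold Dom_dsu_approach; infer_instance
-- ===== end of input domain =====

-- B replaces A's union-find (parent array, path-compressing recursive find, component counter)
-- by quick-find label relabelling: a component-label array where a merge rewrites one label into
-- the other, and the component count is read off at the end as the number of distinct labels.
-- Objective: alternative algorithm of similar cost; return value proved equal on Pre_.

-- ===== PORT A =====
-- stone[0] / stone[1]; in range whenever Pre_ holds (Python raises IndexError otherwise)
def pvKey0 (s : List Int) : Int := (PySem.List.pyGet? s 0).getD 0
def pvKey1 (s : List Int) : Int := (PySem.List.pyGet? s 1).getD 0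

-- DSU.find with path compression; the fuel pr.length + 1 is a totality guard only
-- (the proofs show it is never exhausted on the states A builds).
def pvFind : Nat → List Int → Int → Int × List Int
  | 0, pr, x => (x, pr)
  | f+1, pr, x =>
      let p := PySem.List.pyGetD pr x 0
      if p ≠ x then
        let rp := pvFind f pr p
        let pr2 := PySem.List.pySetD rp.2 x rp.1
        (PySem.List.pyGetD pr2 x 0, pr2)
      else (PySem.List.pyGetD pr x 0, pr)

-- DSU.union on the state (pr, connected_components); the returned bool of A is unused by A.
def pvUnion (st : List Int × Int) (a b : Int) : List Int × Int :=
  let r1 := pvFind (st.1.length + 1) st.1 a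
  let r2 := pvFind (r1.2.length + 1) r1.2 b
  if r1.1 = r2.1 then (r2.2, st.2)
  else (PySem.List.pySetD r2.2 r2.1 r1.1, st.2 - 1)

def dsu_approach (stones : List (List Int)) : Int :=
  let N := stones.length
  let pr0 : List Int := (List.range N).map (fun k => Int.ofNat k)
  let ms := (List.range N).foldl
    (fun (m : PySem.Dict Int Int × PySem.Dict Int Int) k =>
      let s := stones.getD k []
      let m1 := if m.1.contains (pvKey0 s) then m.1 else m.1.insert (pvKey0 s) (k : Int)
      let m2 := if m.2.contains (pvKey1 s) then m.2 else m.2.insert (pvKey1 s) (k : Int)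
      (m1, m2)) (PySem.Dict.empty, PySem.Dict.empty)
  let st := (PySem.List.enumerate stones 0).foldl
    (fun (st : List Int × Int) p =>
      let j1 := (ms.1.get? (pvKey0 p.2)).getD 0
      let st1 := if j1 ≠ p.1 then pvUnion st p.1 j1 else st
      let j2 := (ms.2.get? (pvKey1 p.2)).getD 0
      if j2 ≠ p.1 then pvUnion st1 p.1 j2 else st1) (pr0, (N : Int))
  (N : Int) - st.2

-- ===== PORT B =====
-- quick-find merge: relabel every occurrence of comp[j]'s label into comp[i]'s label
def pvMerge (comp : List Int) (i j : Int) : List Int :=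
  let li := PySem.List.pyGetD comp i 0
  let lj := PySem.List.pyGetD comp j 0
  if li ≠ lj then comp.map (fun c => if c = lj then li else c) else comp

def dsu_approach_alt (stones : List (List Int)) : Int :=
  let N := stones.length
  let ds := (List.range N).foldl
    (fun (m : PySem.Dict Int Int × PySem.Dict Int Int) k =>
      let s := stones.getD k []
      (m.1.setdefault (pvKey0 s) (k : Int), m.2.setdefault (pvKey1 s) (k : Int)))
    (PySem.Dict.empty, PySem.Dict.empty)
  let comp0 : List Int := (List.range N).map (fun k => Int.ofNat k)
  let comp := (PySem.List.enumerate stones 0).foldl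
    (fun comp p =>
      [(ds.1.get? (pvKey0 p.2)).getD 0, (ds.2.get? (pvKey1 p.2)).getD 0].foldl
        (fun comp j => pvMerge comp p.1 j) comp) comp0
  (N : Int) - PySem.Set.len (PySem.Set.ofList comp)

-- ===== PRECONDITION & SPEC =====
-- Pre_ excludes stones with fewer than two coordinates, on which Python A raises IndexError
-- (stone[0] / stone[1]); B raises there as well.
def Pre_dsu_approach (stones : List (List Int)) : Prop := ∀ s ∈ stones, 2 ≤ s.length
instance (stones : List (List Int)) : Decidable (Pre_dsu_approach stones) := by
  unfold Pre_dsu_approach; infer_instance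

def pvWitness_dsu_approach : List (List Int) := [[0, 0], [1, 0], [2, 2]]

def Spec_dsu_approach (stones : List (List Int)) (out : Int) : Prop := out = dsu_approach_alt stones
instance (stones : List (List Int)) (out : Int) : Decidable (Spec_dsu_approach stones out) := by
  unfold Spec_dsu_approach; infer_instance

-- ===== CLAIM (what is proved, stated in full; the proofs are below) =====
def Claim_equal_dsu_approach : Prop := ∀ (stones : List (List Int)), Dom_dsu_approach stones → Pre_dsu_approach stones → Spec_dsu_approach stones (dsu_approach stones)

-- ===== LEMMAS AND PROOFS =====

-- entry of the parent/label array at a Nat position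
def pvG (l : List Int) (k : Nat) : Int := l.getD k 0
def pvRoot : Nat → List Int → Nat → Nat
  | 0, _, x => x
  | f+1, pr, x => if pvG pr x = (x : Int) then x else pvRoot f pr (pvG pr x).toNat
def pvR (n : Nat) (pr : List Int) (x : Nat) : Nat := pvRoot (n+1) pr x
def pvWF (n : Nat) (pr : List Int) : Prop :=
  pr.length = n ∧ ∀ k, k < n → ∃ m, m < n ∧ pvG pr k = (m : Int)
def pvRk (n : Nat) (rk : Nat → Nat) (pr : List Int) : Prop :=
  ∀ k, k < n → pvG pr k ≠ (k : Int) → rk (pvG pr k).toNat < rk k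
def pvM (n : Nat) (rk : Nat → Nat) (x : Nat) : Nat :=
  ((Finset.range n).filter (fun k => rk k ≤ rk x)).card

lemma pvM_le (n : Nat) (rk : Nat → Nat) (x : Nat) : pvM n rk x ≤ n := by
  unfold pvM
  calc ((Finset.range n).filter (fun k => rk k ≤ rk x)).card ≤ (Finset.range n).card :=
        Finset.card_filter_le _ _
    _ = n := Finset.card_range n

lemma pvM_lt (n : Nat) (rk : Nat → Nat) {x y : Nat} (hx : x < n) (h : rk y < rk x) :
    pvM n rk y < pvM n rk x := by
  unfold pvM
  apply Finset.card_lt_card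
  constructor
  · intro k hk
    simp only [Finset.mem_filter, Finset.mem_range] at *
    exact ⟨hk.1, le_trans hk.2 (le_of_lt h)⟩
  · intro hsub
    have := hsub (Finset.mem_filter.2 ⟨Finset.mem_range.2 hx, by simp⟩)
    simp only [Finset.mem_filter] at this
    omega

lemma pvRoot_fuel {n : Nat} {rk : Nat → Nat} {pr : List Int} (hwf : pvWF n pr) (hrk : pvRk n rk pr) :
    ∀ f g x, x < n → pvM n rk x < f → pvM n rk x < g → pvRoot f pr x = pvRoot g pr x := by
  intro f
  induction f with
  | zero => intro g x hx hf; omega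
  | succ f ih =>
    intro g x hx hf hg
    obtain ⟨g', rfl⟩ : ∃ g', g = g' + 1 := ⟨g - 1, by omega⟩
    simp only [pvRoot]
    by_cases hfix : pvG pr x = (x : Int)
    · simp [hfix]
    · simp only [hfix, if_false]
      obtain ⟨m, hm, hme⟩ := hwf.2 x hx
      have hmt : (pvG pr x).toNat = m := by rw [hme]; simp
      have hlt : rk (pvG pr x).toNat < rk x := hrk x hx hfix
      have hM : pvM n rk (pvG pr x).toNat < pvM n rk x := pvM_lt n rk hx hlt
      exact ih g' (pvG pr x).toNat (by omega) (by omega) (by omega)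

lemma pvR_unfold {n : Nat} {rk : Nat → Nat} {pr : List Int} (hwf : pvWF n pr) (hrk : pvRk n rk pr)
    {x : Nat} (hx : x < n) :
    pvR n pr x = if pvG pr x = (x : Int) then x else pvR n pr (pvG pr x).toNat := by
  by_cases hfix : pvG pr x = (x : Int)
  · simp [pvR, pvRoot, hfix]
  · simp only [hfix, if_false]
    show pvRoot (n+1) pr x = pvR n pr (pvG pr x).toNat
    simp only [pvRoot, hfix, if_false]
    apply pvRoot_fuel hwf hrk
    · obtain ⟨m, hm, hme⟩ := hwf.2 x hx
      rw [hme]; simpa using hm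
    · have := pvM_lt n rk hx (hrk x hx hfix)
      have := pvM_le n rk x
      omega
    · have := pvM_le n rk (pvG pr x).toNat
      omega

lemma pvR_props {n : Nat} {rk : Nat → Nat} {pr : List Int} (hwf : pvWF n pr) (hrk : pvRk n rk pr) :
    ∀ x, x < n →
      pvR n pr x < n ∧ pvG pr (pvR n pr x) = (pvR n pr x : Int) ∧
      (pvR n pr x ≠ x → rk (pvR n pr x) < rk x) := by
  intro x
  induction hm : pvM n rk x using Nat.strong_induction_on generalizing x with
  | _ M ih =>
  intro hx
  rw [pvR_unfold hwf hrk hx]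
  by_cases hfix : pvG pr x = (x : Int)
  · simp [hfix, hx]
  · simp only [hfix, if_false]
    obtain ⟨m, hmn, hme⟩ := hwf.2 x hx
    have hmt : (pvG pr x).toNat = m := by rw [hme]; simp
    have hlt : rk (pvG pr x).toNat < rk x := hrk x hx hfix
    have hM : pvM n rk (pvG pr x).toNat < M := by rw [← hm]; exact pvM_lt n rk hx hlt
    obtain ⟨h1, h2, h3⟩ := ih _ hM (x := (pvG pr x).toNat) rfl (by omega)
    refine ⟨h1, h2, fun _ => ?_⟩
    by_cases hr : pvR n pr (pvG pr x).toNat = (pvG pr x).toNat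
    · rw [hr]; exact hlt
    · exact lt_trans (h3 hr) hlt

lemma pvG_set (pr : List Int) (x : Nat) (v : Int) (z : Nat) (hx : x < pr.length) :
    pvG (pr.set x v) z = if z = x then v else pvG pr z := by
  unfold pvG
  by_cases h : z = x
  · subst h; simp [List.getD, hx]
  · simp [List.getD, List.getElem?_set_ne (by omega : x ≠ z), h]

lemma pvCompress {n : Nat} {rk : Nat → Nat} {pr : List Int} (hwf : pvWF n pr) (hrk : pvRk n rk pr)
    {x : Nat} (hx : x < n) :
    pvWF n (pr.set x ((pvR n pr x : Nat) : Int)) ∧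
    pvRk n rk (pr.set x ((pvR n pr x : Nat) : Int)) ∧
    (∀ z, z < n → pvR n (pr.set x ((pvR n pr x : Nat) : Int)) z = pvR n pr z) := by
  set r := pvR n pr x with hr
  obtain ⟨hrn, hrfix, hrrk⟩ := pvR_props hwf hrk x hx
  have hxlen : x < pr.length := by rw [hwf.1]; exact hx
  set pr2 := pr.set x ((r : Nat) : Int) with hpr2
  have hget : ∀ z, pvG pr2 z = if z = x then ((r : Nat) : Int) else pvG pr z :=
    fun z => pvG_set pr x _ z hxlen
  have hwf2 : pvWF n pr2 := by
    refine ⟨by simp [hpr2, hwf.1], fun k hk => ?_⟩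
    rw [hget]
    by_cases h : k = x
    · exact ⟨r, hrn, by simp [h]⟩
    · simpa [h] using hwf.2 k hk
  have hrk2 : pvRk n rk pr2 := by
    intro k hk hne
    rw [hget] at hne ⊢
    by_cases h : k = x
    · rw [if_pos h] at hne ⊢
      have hrx : r ≠ x := by intro hh; apply hne; rw [h, hh]
      rw [Int.toNat_natCast, h]
      exact hrrk hrx
    · rw [if_neg h] at hne ⊢
      exact hrk k hk hne
  refine ⟨hwf2, hrk2, ?_⟩
  intro z
  induction hm : pvM n rk z using Nat.strong_induction_on generalizing z with
  | _ M ih =>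
  intro hz
  by_cases h : z = x
  · rw [pvR_unfold hwf2 hrk2 hz, hget, if_pos h]
    by_cases hrx : r = x
    · rw [if_pos (by rw [h, hrx]), h, ← hr, hrx]
    · rw [if_neg (by intro hh; exact hrx (by rw [h] at hh; exact_mod_cast hh)),
        Int.toNat_natCast]
      rw [pvR_unfold hwf2 hrk2 hrn, hget, if_neg hrx, hrfix, if_pos rfl, h, ← hr]
  · rw [pvR_unfold hwf2 hrk2 hz, hget, if_neg h, pvR_unfold hwf hrk hz]
    by_cases hfix : pvG pr z = (z : Int)
    · simp [hfix]
    · simp only [hfix, if_false]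
      obtain ⟨m, hmn, hme⟩ := hwf.2 z hz
      exact ih _ (by rw [← hm]; exact pvM_lt n rk hz (hrk z hz hfix)) _ rfl
        (by rw [hme]; simpa using hmn)

lemma pvLink {n : Nat} {rk : Nat → Nat} {pr : List Int} (hwf : pvWF n pr) (hrk : pvRk n rk pr)
    {x y : Nat} (hx : x < n) (hy : y < n) (hxy : x ≠ y)
    (hrx : pvG pr x = (x : Int)) (hry : pvG pr y = (y : Int)) :
    pvWF n (pr.set y (x : Int)) ∧
    (∃ rk', pvRk n rk' (pr.set y (x : Int))) ∧
    (∀ z, z < n → pvR n (pr.set y (x : Int)) z = if pvR n pr z = y then x else pvR n pr z) := by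
  have hylen : y < pr.length := by rw [hwf.1]; exact hy
  set pr2 := pr.set y ((x : Nat) : Int) with hpr2
  have hget : ∀ z, pvG pr2 z = if z = y then ((x : Nat) : Int) else pvG pr z :=
    fun z => pvG_set pr y _ z hylen
  have hwf2 : pvWF n pr2 := by
    refine ⟨by simp [hpr2, hwf.1], fun k hk => ?_⟩
    rw [hget]
    by_cases h : k = y
    · exact ⟨x, hx, by simp [h]⟩
    · simpa [h] using hwf.2 k hk
  set rk' : Nat → Nat := fun k => rk k + (if pvR n pr k = y then rk x + 1 else 0) with hrk'
  have hRfix : ∀ w, w < n → pvG pr w = (w : Int) → pvR n pr w = w := by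
    intro w hw hfix
    rw [pvR_unfold hwf hrk hw, if_pos hfix]
  have hRx : pvR n pr x = x := hRfix x hx hrx
  have hRy : pvR n pr y = y := hRfix y hy hry
  have hRstep : ∀ k, k < n → pvG pr k ≠ (k : Int) → pvR n pr (pvG pr k).toNat = pvR n pr k := by
    intro k hk hne
    rw [pvR_unfold hwf hrk hk, if_neg hne]
  have hrk2 : pvRk n rk' pr2 := by
    intro k hk hne
    rw [hget] at hne ⊢
    by_cases h : k = y
    · rw [if_pos h, Int.toNat_natCast, h]
      show rk' x < rk' y
      simp [hrk', hRx, hRy, hxy]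
      omega
    · rw [if_neg h] at hne ⊢
      have hlt := hrk k hk hne
      have hRR : pvR n pr (pvG pr k).toNat = pvR n pr k := hRstep k hk hne
      simp only [hrk', hRR]
      split_ifs <;> omega
  refine ⟨hwf2, ⟨rk', hrk2⟩, ?_⟩
  intro z
  induction hm : pvM n rk' z using Nat.strong_induction_on generalizing z with
  | _ M ih =>
  intro hz
  by_cases h : z = y
  · rw [pvR_unfold hwf2 hrk2 hz, hget, if_pos h,
      if_neg (by intro hh; exact hxy (by rw [h] at hh; exact_mod_cast hh)), Int.toNat_natCast]
    rw [pvR_unfold hwf2 hrk2 hx, hget, if_neg hxy, hrx, if_pos rfl, h, hRy, if_pos rfl]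
  · rw [pvR_unfold hwf2 hrk2 hz, hget, if_neg h]
    by_cases hfix : pvG pr z = (z : Int)
    · rw [if_pos hfix]
      have hzz := hRfix z hz hfix
      rw [hzz, if_neg h]
    · rw [if_neg hfix]
      obtain ⟨m, hmn, hme⟩ := hwf.2 z hz
      have harg : (pvG pr z).toNat < n := by rw [hme]; simpa using hmn
      have hRR : pvR n pr (pvG pr z).toNat = pvR n pr z := hRstep z hz hfix
      have hMlt : pvM n rk' (pvG pr z).toNat < M := by
        rw [← hm]
        apply pvM_lt n rk' hz
        have hlt := hrk z hz hfix
        simp only [hrk', hRR]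
        split_ifs <;> omega
      rw [ih _ hMlt _ rfl harg, hRR]


def pvFindOK (n : Nat) (rk : Nat → Nat) (pr pr' : List Int) (x : Nat) : Prop :=
  pvWF n pr' ∧ pvRk n rk pr' ∧ (∀ z, z < n → pvR n pr' z = pvR n pr z) ∧
  (∀ z, ¬ rk z ≤ rk x → pvG pr' z = pvG pr z)

lemma pyGetD_pvG (pr : List Int) (x : Nat) : PySem.List.pyGetD pr (x : Int) 0 = pvG pr x := by
  simp [PySem.List.pyGetD_natCast, pvG]

lemma pvFind_succ (f : Nat) (pr : List Int) (x : Int) :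
    pvFind (f+1) pr x =
      if PySem.List.pyGetD pr x 0 ≠ x then
        (PySem.List.pyGetD
            (PySem.List.pySetD (pvFind f pr (PySem.List.pyGetD pr x 0)).2 x
              (pvFind f pr (PySem.List.pyGetD pr x 0)).1) x 0,
          PySem.List.pySetD (pvFind f pr (PySem.List.pyGetD pr x 0)).2 x
            (pvFind f pr (PySem.List.pyGetD pr x 0)).1)
      else (PySem.List.pyGetD pr x 0, pr) := rfl

lemma pvFind_spec {n : Nat} {rk : Nat → Nat} {pr : List Int} (hwf : pvWF n pr) (hrk : pvRk n rk pr) :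
    ∀ fuel x, x < n → pvM n rk x < fuel →
      (pvFind fuel pr (x : Int)).1 = ((pvR n pr x : Nat) : Int) ∧
      pvFindOK n rk pr (pvFind fuel pr (x : Int)).2 x := by
  intro fuel
  induction fuel with
  | zero => intro x hx hf; omega
  | succ f ih =>
    intro x hx hf
    by_cases hfix : pvG pr x = (x : Int)
    · rw [pvFind_succ]
      simp only [pyGetD_pvG]
      rw [if_neg (by simp [hfix])]
      have hR : pvR n pr x = x := by rw [pvR_unfold hwf hrk hx, if_pos hfix]
      rw [hR]
      exact ⟨hfix, hwf, hrk, fun z _ => rfl, fun z _ => rfl⟩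
    · obtain ⟨m, hmn, hme⟩ := hwf.2 x hx
      have hmt : (pvG pr x).toNat = m := by rw [hme]; simp
      have hrklt : rk m < rk x := by rw [← hmt]; exact hrk x hx hfix
      have hMm : pvM n rk m < f := by
        have := pvM_lt n rk hx hrklt
        omega
      obtain ⟨hv, hwf2, hrk2, hroots2, hsame2⟩ := ih m hmn hMm
      rw [pvFind_succ]
      simp only [pyGetD_pvG]
      rw [hme, if_pos (by rw [← hme]; exact hfix)]
      rw [hv]
      set P := (pvFind f pr ((m : Nat) : Int)).2 with hP
      have hxlen2 : x < P.length := by rw [hwf2.1]; exact hx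
      have hGx2 : pvG P x = pvG pr x := hsame2 x (by omega)
      have hRPx : pvR n P x = pvR n pr m := by
        rw [pvR_unfold hwf2 hrk2 hx, hGx2, if_neg hfix, hmt]
        exact hroots2 m hmn
      have hset : PySem.List.pySetD P (x : Int) ((pvR n pr m : Nat) : Int)
          = P.set x ((pvR n P x : Nat) : Int) := by
        rw [hRPx]
        simp [PySem.List.pySetD_natCast]
      rw [hset]
      obtain ⟨hwf3, hrk3, hroots3⟩ := pvCompress hwf2 hrk2 hx
      have hRx : pvR n pr x = pvR n pr m := by
        rw [pvR_unfold hwf hrk hx, if_neg hfix, hmt]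
      constructor
      · show pvG _ x = _
        rw [pvG_set _ _ _ _ hxlen2, if_pos rfl, hRx, hRPx]
      · refine ⟨hwf3, hrk3, fun z hz => ?_, fun z hzr => ?_⟩
        · rw [hroots3 z hz, hroots2 z hz]
        · rw [pvG_set _ _ _ _ hxlen2, if_neg (by rintro rfl; exact hzr le_rfl)]
          exact hsame2 z (fun hle => hzr (le_trans hle (le_of_lt hrklt)))



def pvCpl (n : Nat) (pr : List Int) (cc : Int) (comp : List Int) : Prop :=
  pvWF n pr ∧ (∃ rk, pvRk n rk pr) ∧ comp.length = n ∧
  (∀ a b, a < n → b < n → (pvR n pr a = pvR n pr b ↔ pvG comp a = pvG comp b)) ∧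
  cc = (comp.toFinset.card : Int)

lemma pvG_mem (comp : List Int) (z : Nat) (hz : z < comp.length) : pvG comp z ∈ comp := by
  unfold pvG
  rw [List.getD_eq_getElem _ _ hz]
  exact List.getElem_mem hz

lemma pvG_map_replace (comp : List Int) (li lj : Int) (z : Nat) (hz : z < comp.length) :
    pvG (comp.map fun c => if c = lj then li else c) z
      = if pvG comp z = lj then li else pvG comp z := by
  unfold pvG
  rw [List.getD_eq_getElem _ _ (by simpa using hz), List.getD_eq_getElem _ _ hz]
  simp

lemma toFinset_replace (comp : List Int) (li lj : Int) (hli : li ∈ comp) (hne : li ≠ lj) :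
    (comp.map fun c => if c = lj then li else c).toFinset = comp.toFinset.erase lj := by
  ext v
  simp only [List.mem_toFinset, List.mem_map, Finset.mem_erase]
  constructor
  · rintro ⟨c, hc, hv⟩
    by_cases h : c = lj
    · simp only [h] at hv
      exact ⟨fun hh => hne (hv.trans hh), hv ▸ hli⟩
    · simp only [if_neg h] at hv
      exact ⟨fun hh => h (hv.trans hh), hv ▸ hc⟩
  · rintro ⟨hv, hmem⟩
    exact ⟨v, hmem, by rw [if_neg hv]⟩

lemma pvUnion_spec {n : Nat} {pr : List Int} {cc : Int} {comp : List Int}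
    (h : pvCpl n pr cc comp) {a b : Nat} (ha : a < n) (hb : b < n) :
    pvCpl n (pvUnion (pr, cc) (a : Int) (b : Int)).1 (pvUnion (pr, cc) (a : Int) (b : Int)).2
      (pvMerge comp (a : Int) (b : Int)) := by
  obtain ⟨hwf, ⟨rk, hrk⟩, hcl, hiff, hcc⟩ := h
  have hfuel1 : pvM n rk a < pr.length + 1 := by
    have := pvM_le n rk a; rw [hwf.1]; omega
  obtain ⟨hv1, hwf1, hrk1, hroots1, _⟩ := pvFind_spec hwf hrk (pr.length + 1) a ha hfuel1
  set P1 := (pvFind (pr.length + 1) pr (a : Int)).2 with hP1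
  have hfuel2 : pvM n rk b < P1.length + 1 := by
    have := pvM_le n rk b; rw [hwf1.1]; omega
  obtain ⟨hv2, hwf2, hrk2, hroots2', _⟩ := pvFind_spec hwf1 hrk1 (P1.length + 1) b hb hfuel2
  set P2 := (pvFind (P1.length + 1) P1 (b : Int)).2 with hP2
  have hroots2 : ∀ z, z < n → pvR n P2 z = pvR n pr z := fun z hz => by
    rw [hroots2' z hz, hroots1 z hz]
  have hv2' : (pvFind (P1.length + 1) P1 (b : Int)).1 = ((pvR n pr b : Nat) : Int) := by
    rw [hv2, hroots1 b hb]
  set x := pvR n pr a with hxdef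
  set y := pvR n pr b with hydef
  have hxn : x < n := (pvR_props hwf hrk a ha).1
  have hyn : y < n := (pvR_props hwf hrk b hb).1
  have hli : PySem.List.pyGetD comp (a : Int) 0 = pvG comp a := pyGetD_pvG comp a
  have hlj : PySem.List.pyGetD comp (b : Int) 0 = pvG comp b := pyGetD_pvG comp b
  show pvCpl n _ _ _
  rw [pvUnion, pvMerge]
  simp only [← hP1, ← hP2, hv1, hv2', hli, hlj]
  by_cases hxy : x = y
  · have hcomp : pvG comp a = pvG comp b := (hiff a b ha hb).1 (by rw [← hxdef, ← hydef, hxy])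
    rw [if_pos (by rw [hxy]), if_neg (by simp [hcomp])]
    refine ⟨hwf2, ⟨rk, hrk2⟩, hcl, fun c d hc hd => ?_, hcc⟩
    rw [hroots2 c hc, hroots2 d hd]
    exact hiff c d hc hd
  · have hcomp : pvG comp a ≠ pvG comp b := fun hh =>
      hxy ((hiff a b ha hb).2 hh)
    rw [if_neg (by simpa using hxy), if_pos (by simpa using hcomp)]
    have hfixx : pvG P2 x = (x : Int) := by
      have := (pvR_props hwf2 hrk2 a ha).2.1
      rwa [hroots2 a ha, ← hxdef] at this
    have hfixy : pvG P2 y = (y : Int) := by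
      have := (pvR_props hwf2 hrk2 b hb).2.1
      rwa [hroots2 b hb, ← hydef] at this
    have hset : PySem.List.pySetD P2 ((y : Nat) : Int) ((x : Nat) : Int) = P2.set y (x : Int) := by
      simp [PySem.List.pySetD_natCast]
    rw [hset]
    obtain ⟨hwfL, hrkL, hrootsL⟩ := pvLink hwf2 hrk2 hxn hyn hxy hfixx hfixy
    have hrootsL' : ∀ z, z < n → pvR n (P2.set y (x : Int)) z
        = if pvR n pr z = y then x else pvR n pr z := by
      intro z hz
      rw [hrootsL z hz, hroots2 z hz]
    have hljmem : pvG comp b ∈ comp := pvG_mem comp b (by rw [hcl]; exact hb)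
    have hlimem : pvG comp a ∈ comp := pvG_mem comp a (by rw [hcl]; exact ha)
    have htf := toFinset_replace comp (pvG comp a) (pvG comp b) hlimem hcomp
    refine ⟨hwfL, hrkL, by simpa using hcl, fun c d hc hd => ?_, ?_⟩
    · rw [hrootsL' c hc, hrootsL' d hd,
        pvG_map_replace comp _ _ c (by rw [hcl]; exact hc),
        pvG_map_replace comp _ _ d (by rw [hcl]; exact hd)]
      have hcy : pvR n pr c = y ↔ pvG comp c = pvG comp b := by
        constructor
        · intro hh; exact (hiff c b hc hb).1 (by rw [hh])
        · intro hh; rw [hydef]; exact (hiff c b hc hb).2 hh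
      have hcx : pvR n pr c = x ↔ pvG comp c = pvG comp a := by
        constructor
        · intro hh; exact (hiff c a hc ha).1 (by rw [hh])
        · intro hh; rw [hxdef]; exact (hiff c a hc ha).2 hh
      have hdy : pvR n pr d = y ↔ pvG comp d = pvG comp b := by
        constructor
        · intro hh; exact (hiff d b hd hb).1 (by rw [hh])
        · intro hh; rw [hydef]; exact (hiff d b hd hb).2 hh
      have hdx : pvR n pr d = x ↔ pvG comp d = pvG comp a := by
        constructor
        · intro hh; exact (hiff d a hd ha).1 (by rw [hh])
        · intro hh; rw [hxdef]; exact (hiff d a hd ha).2 hh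
      by_cases h1 : pvR n pr c = y <;> by_cases h2 : pvR n pr d = y
      · rw [if_pos h1, if_pos h2, if_pos (hcy.1 h1), if_pos (hdy.1 h2)]
        simp
      · rw [if_pos h1, if_neg h2, if_pos (hcy.1 h1), if_neg (fun hh => h2 (hdy.2 hh))]
        constructor
        · intro hh; exact (hdx.1 hh.symm).symm
        · intro hh; exact (hdx.2 hh.symm).symm
      · rw [if_neg h1, if_pos h2, if_neg (fun hh => h1 (hcy.2 hh)), if_pos (hdy.1 h2)]
        exact ⟨fun hh => hcx.1 hh, fun hh => hcx.2 hh⟩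
      · rw [if_neg h1, if_neg h2, if_neg (fun hh => h1 (hcy.2 hh)),
          if_neg (fun hh => h2 (hdy.2 hh))]
        exact hiff c d hc hd
    · rw [htf, Finset.card_erase_of_mem (List.mem_toFinset.2 hljmem), hcc]
      have hpos : 0 < comp.toFinset.card :=
        Finset.card_pos.2 ⟨pvG comp b, List.mem_toFinset.2 hljmem⟩
      push_cast [Nat.cast_sub (by omega : 1 ≤ comp.toFinset.card)]
      ring

lemma pvStep {n : Nat} {pr : List Int} {cc : Int} {comp : List Int}
    (h : pvCpl n pr cc comp) {i j : Nat} (hi : i < n) (hj : j < n) :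
    pvCpl n (if (j : Int) ≠ (i : Int) then pvUnion (pr, cc) (i : Int) (j : Int) else (pr, cc)).1
            (if (j : Int) ≠ (i : Int) then pvUnion (pr, cc) (i : Int) (j : Int) else (pr, cc)).2
            (pvMerge comp (i : Int) (j : Int)) := by
  by_cases hji : (j : Int) = (i : Int)
  · have hn : j = i := by exact_mod_cast hji
    rw [if_neg (by simp [hji])]
    have : pvMerge comp (i : Int) (j : Int) = comp := by
      rw [pvMerge, hn]
      simp
    rw [this]
    exact h
  · rw [if_pos hji]
    exact pvUnion_spec h hi hj


lemma pvG_range (n k : Nat) (hk : k < n) :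
    pvG ((List.range n).map (fun k => Int.ofNat k)) k = (k : Int) := by
  unfold pvG
  rw [List.getD_eq_getElem _ _ (by simpa using hk), List.getElem_map, List.getElem_range]
  rfl

-- initial coupling: identity parents, identity labels, n components
lemma pvInit (n : Nat) :
    pvCpl n ((List.range n).map (fun k => Int.ofNat k)) (n : Int)
      ((List.range n).map (fun k => Int.ofNat k)) := by
  have hfix : ∀ a, a < n → pvG ((List.range n).map (fun k => Int.ofNat k)) a = (a : Int) :=
    fun a ha => pvG_range n a ha
  have hwf : pvWF n ((List.range n).map (fun k => Int.ofNat k)) := by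
    refine ⟨by simp, fun k hk => ⟨k, hk, hfix k hk⟩⟩
  have hrk : pvRk n (fun _ => 0) ((List.range n).map (fun k => Int.ofNat k)) := by
    intro k hk hne
    exact absurd (hfix k hk) hne
  have hR : ∀ a, a < n → pvR n ((List.range n).map (fun k => Int.ofNat k)) a = a := by
    intro a ha
    rw [pvR_unfold hwf hrk ha, if_pos (hfix a ha)]
  have hnd : ((List.range n).map (fun k => Int.ofNat k)).Nodup :=
    List.Nodup.map (fun a b h => Int.ofNat.inj h) List.nodup_range
  refine ⟨hwf, ⟨_, hrk⟩, by simp, fun a b ha hb => ?_, ?_⟩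
  · rw [hR a ha, hR b hb, hfix a ha, hfix b hb]
    exact ⟨fun hh => by exact_mod_cast hh, fun hh => by exact_mod_cast hh⟩
  · rw [List.toFinset_card_of_nodup hnd]
    simp

-- distinct labels counted by B's set(comp)
lemma pvSetLen (comp : List Int) :
    PySem.Set.len (PySem.Set.ofList comp) = (comp.toFinset.card : Int) := by
  have hnd : (PySem.Set.ofList comp).Nodup := PySem.Set.nodup_ofList comp
  have htf : (PySem.Set.ofList comp).toFinset = comp.toFinset := by
    ext v
    simp [PySem.Set.mem_ofList]
  show ((PySem.Set.ofList comp).length : Int) = _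
  rw [← List.toFinset_card_of_nodup hnd, htf]

-- values stored in the first-occurrence dicts are indices < n
def pvDInv (n : Nat) (d : PySem.Dict Int Int) : Prop :=
  ∀ k v, d.get? k = some v → ∃ jN, jN < n ∧ v = ((jN : Nat) : Int)

lemma pvDict_fold (n : Nat) (stones : List (List Int)) :
    ∀ (l : List Nat) (d : PySem.Dict Int Int × PySem.Dict Int Int),
      (∀ k ∈ l, k < n) → pvDInv n d.1 → pvDInv n d.2 →
      pvDInv n (l.foldl (fun (m : PySem.Dict Int Int × PySem.Dict Int Int) k =>
          let s := stones.getD k []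
          let m1 := if m.1.contains (pvKey0 s) then m.1 else m.1.insert (pvKey0 s) (k : Int)
          let m2 := if m.2.contains (pvKey1 s) then m.2 else m.2.insert (pvKey1 s) (k : Int)
          (m1, m2)) d).1 ∧
      pvDInv n (l.foldl (fun (m : PySem.Dict Int Int × PySem.Dict Int Int) k =>
          let s := stones.getD k []
          let m1 := if m.1.contains (pvKey0 s) then m.1 else m.1.insert (pvKey0 s) (k : Int)
          let m2 := if m.2.contains (pvKey1 s) then m.2 else m.2.insert (pvKey1 s) (k : Int)
          (m1, m2)) d).2 ∧
      (∀ key, d.1.contains key = true → (l.foldl (fun (m : PySem.Dict Int Int × PySem.Dict Int Int) k =>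
          let s := stones.getD k []
          let m1 := if m.1.contains (pvKey0 s) then m.1 else m.1.insert (pvKey0 s) (k : Int)
          let m2 := if m.2.contains (pvKey1 s) then m.2 else m.2.insert (pvKey1 s) (k : Int)
          (m1, m2)) d).1.contains key = true) ∧
      (∀ key, d.2.contains key = true → (l.foldl (fun (m : PySem.Dict Int Int × PySem.Dict Int Int) k =>
          let s := stones.getD k []
          let m1 := if m.1.contains (pvKey0 s) then m.1 else m.1.insert (pvKey0 s) (k : Int)
          let m2 := if m.2.contains (pvKey1 s) then m.2 else m.2.insert (pvKey1 s) (k : Int)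
          (m1, m2)) d).2.contains key = true) ∧
      (∀ k ∈ l, (l.foldl (fun (m : PySem.Dict Int Int × PySem.Dict Int Int) k =>
          let s := stones.getD k []
          let m1 := if m.1.contains (pvKey0 s) then m.1 else m.1.insert (pvKey0 s) (k : Int)
          let m2 := if m.2.contains (pvKey1 s) then m.2 else m.2.insert (pvKey1 s) (k : Int)
          (m1, m2)) d).1.contains (pvKey0 (stones.getD k [])) = true ∧
        (l.foldl (fun (m : PySem.Dict Int Int × PySem.Dict Int Int) k =>
          let s := stones.getD k []
          let m1 := if m.1.contains (pvKey0 s) then m.1 else m.1.insert (pvKey0 s) (k : Int)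
          let m2 := if m.2.contains (pvKey1 s) then m.2 else m.2.insert (pvKey1 s) (k : Int)
          (m1, m2)) d).2.contains (pvKey1 (stones.getD k [])) = true) := by
  intro l
  induction l with
  | nil => exact fun d _ h1 h2 => ⟨h1, h2, fun _ h => h, fun _ h => h, by simp⟩
  | cons k t ih =>
    intro d hl h1 h2
    simp only [List.foldl_cons]
    set s := stones.getD k []
    set d1 := if d.1.contains (pvKey0 s) then d.1 else d.1.insert (pvKey0 s) (k : Int) with hd1
    set d2 := if d.2.contains (pvKey1 s) then d.2 else d.2.insert (pvKey1 s) (k : Int) with hd2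
    have hkn : k < n := hl k (by simp)
    have hInv1 : pvDInv n d1 := by
      rw [hd1]
      split_ifs with hc
      · exact h1
      · intro key v hget
        rw [PySem.Dict.get?_insert] at hget
        split_ifs at hget with he
        · exact ⟨k, hkn, by injection hget with hh; exact hh.symm⟩
        · exact h1 key v hget
    have hInv2 : pvDInv n d2 := by
      rw [hd2]
      split_ifs with hc
      · exact h2
      · intro key v hget
        rw [PySem.Dict.get?_insert] at hget
        split_ifs at hget with he
        · exact ⟨k, hkn, by injection hget with hh; exact hh.symm⟩
        · exact h2 key v hget
    have hMon1 : ∀ key, d.1.contains key = true → d1.contains key = true := by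
      intro key hc
      rw [hd1]
      split_ifs
      · exact hc
      · rw [PySem.Dict.contains_insert]
        simp [hc]
    have hMon2 : ∀ key, d.2.contains key = true → d2.contains key = true := by
      intro key hc
      rw [hd2]
      split_ifs
      · exact hc
      · rw [PySem.Dict.contains_insert]
        simp [hc]
    have hSelf1 : d1.contains (pvKey0 s) = true := by
      rw [hd1]
      split_ifs with hc
      · exact hc
      · exact PySem.Dict.contains_insert_self _ _ _
    have hSelf2 : d2.contains (pvKey1 s) = true := by
      rw [hd2]
      split_ifs with hc
      · exact hc
      · exact PySem.Dict.contains_insert_self _ _ _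
    obtain ⟨r1, r2, rm1, rm2, rall⟩ := ih (d1, d2) (fun k hk => hl k (by simp [hk])) hInv1 hInv2
    refine ⟨r1, r2, fun key hc => rm1 key (hMon1 key hc), fun key hc => rm2 key (hMon2 key hc),
      fun k' hk' => ?_⟩
    rcases List.mem_cons.1 hk' with he | ht
    · subst he
      exact ⟨rm1 _ hSelf1, rm2 _ hSelf2⟩
    · exact rall k' ht

-- the main loop preserves the coupling
lemma pvLoop (n : Nat) (m1 m2 : PySem.Dict Int Int) :
    ∀ (es : List (Int × List Int)) (pr : List Int) (cc : Int) (comp : List Int),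
      pvCpl n pr cc comp →
      (∀ p ∈ es, ∃ iN j1 j2 : Nat, iN < n ∧ j1 < n ∧ j2 < n ∧ p.1 = ((iN : Nat) : Int) ∧
          m1.get? (pvKey0 p.2) = some ((j1 : Nat) : Int) ∧
          m2.get? (pvKey1 p.2) = some ((j2 : Nat) : Int)) →
      pvCpl n
        (es.foldl (fun (st : List Int × Int) p =>
          let j1 := (m1.get? (pvKey0 p.2)).getD 0
          let st1 := if j1 ≠ p.1 then pvUnion st p.1 j1 else st
          let j2 := (m2.get? (pvKey1 p.2)).getD 0
          if j2 ≠ p.1 then pvUnion st1 p.1 j2 else st1) (pr, cc)).1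
        (es.foldl (fun (st : List Int × Int) p =>
          let j1 := (m1.get? (pvKey0 p.2)).getD 0
          let st1 := if j1 ≠ p.1 then pvUnion st p.1 j1 else st
          let j2 := (m2.get? (pvKey1 p.2)).getD 0
          if j2 ≠ p.1 then pvUnion st1 p.1 j2 else st1) (pr, cc)).2
        (es.foldl (fun comp p =>
          [(m1.get? (pvKey0 p.2)).getD 0, (m2.get? (pvKey1 p.2)).getD 0].foldl
            (fun comp j => pvMerge comp p.1 j) comp) comp) := by
  intro es
  induction es with
  | nil => exact fun pr cc comp h _ => h
  | cons p t ih =>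
    intro pr cc comp h hes
    obtain ⟨iN, j1, j2, hiN, hj1, hj2, hp1, hg1, hg2⟩ := hes p (by simp)
    simp only [List.foldl_cons, hg1, hg2, hp1, Option.getD_some]
    have h1 := pvStep h hiN hj1
    have h2 := pvStep h1 hiN hj2
    simp only [List.foldl_nil]
    have hpair : ((if ((j1 : Nat) : Int) ≠ ((iN : Nat) : Int) then
        pvUnion (pr, cc) ((iN : Nat) : Int) ((j1 : Nat) : Int) else (pr, cc)).1,
        (if ((j1 : Nat) : Int) ≠ ((iN : Nat) : Int) then
        pvUnion (pr, cc) ((iN : Nat) : Int) ((j1 : Nat) : Int) else (pr, cc)).2)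
        = (if ((j1 : Nat) : Int) ≠ ((iN : Nat) : Int) then
        pvUnion (pr, cc) ((iN : Nat) : Int) ((j1 : Nat) : Int) else (pr, cc)) := rfl
    rw [hpair] at h2
    exact ih _ _ _ h2 (fun q hq => hes q (by simp [hq]))

-- ===== VERDICT (by name: the statement is the Claim_ definition above) =====
theorem dsu_approach_spec : Claim_equal_dsu_approach := by
  intro stones _ _
  show dsu_approach stones = dsu_approach_alt stones
  simp only [dsu_approach, dsu_approach_alt]
  -- B's setdefault dict loop builds the same pair of dicts as A's membership-test loop
  have hdicts :
      (List.range stones.length).foldl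
        (fun (m : PySem.Dict Int Int × PySem.Dict Int Int) k =>
          let s := stones.getD k []
          (m.1.setdefault (pvKey0 s) (k : Int), m.2.setdefault (pvKey1 s) (k : Int)))
        (PySem.Dict.empty, PySem.Dict.empty)
      = (List.range stones.length).foldl
        (fun (m : PySem.Dict Int Int × PySem.Dict Int Int) k =>
          let s := stones.getD k []
          let m1 := if m.1.contains (pvKey0 s) then m.1 else m.1.insert (pvKey0 s) (k : Int)
          let m2 := if m.2.contains (pvKey1 s) then m.2 else m.2.insert (pvKey1 s) (k : Int)
          (m1, m2))
        (PySem.Dict.empty, PySem.Dict.empty) := by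
    refine List.foldl_ext _ _ _ (fun m k _ => ?_)
    have e1 : ∀ (d : PySem.Dict Int Int) key (v : Int),
        d.setdefault key v = if d.contains key then d else d.insert key v := by
      intro d key v
      by_cases hc : d.contains key = true
      · rw [PySem.Dict.setdefault_of_contains d v hc, if_pos hc]
      · rw [PySem.Dict.setdefault_of_not_contains d v (by simpa using hc),
          if_neg (by simpa using hc)]
    simp only [e1]
  rw [hdicts]
  set n := stones.length with hn
  set ms := (List.range n).foldl
        (fun (m : PySem.Dict Int Int × PySem.Dict Int Int) k =>
          let s := stones.getD k []
          let m1 := if m.1.contains (pvKey0 s) then m.1 else m.1.insert (pvKey0 s) (k : Int)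
          let m2 := if m.2.contains (pvKey1 s) then m.2 else m.2.insert (pvKey1 s) (k : Int)
          (m1, m2))
        (PySem.Dict.empty, PySem.Dict.empty) with hms
  obtain ⟨hI1, hI2, _, _, hall⟩ := pvDict_fold n stones (List.range n)
    (PySem.Dict.empty, PySem.Dict.empty) (fun k hk => List.mem_range.1 hk)
    (fun k v h => by simp [PySem.Dict.get?_empty] at h)
    (fun k v h => by simp [PySem.Dict.get?_empty] at h)
  rw [← hms] at hI1 hI2 hall
  have hes : ∀ p ∈ PySem.List.enumerate stones 0,
      ∃ iN j1 j2 : Nat, iN < n ∧ j1 < n ∧ j2 < n ∧ p.1 = ((iN : Nat) : Int) ∧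
        ms.1.get? (pvKey0 p.2) = some ((j1 : Nat) : Int) ∧
        ms.2.get? (pvKey1 p.2) = some ((j2 : Nat) : Int) := by
    intro p hp
    obtain ⟨k, hk, rfl⟩ := (PySem.List.mem_enumerate_iff stones 0 p).1 hp
    have hsk : stones[k] = stones.getD k [] := (List.getD_eq_getElem stones [] hk).symm
    obtain ⟨hc1, hc2⟩ := hall k (List.mem_range.2 hk)
    rw [PySem.Dict.contains_eq_isSome_get?] at hc1 hc2
    obtain ⟨v1, hv1⟩ := Option.isSome_iff_exists.1 hc1
    obtain ⟨v2, hv2⟩ := Option.isSome_iff_exists.1 hc2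
    obtain ⟨j1, hj1, rfl⟩ := hI1 _ _ hv1
    obtain ⟨j2, hj2, rfl⟩ := hI2 _ _ hv2
    exact ⟨k, j1, j2, hk, hj1, hj2, by simp, by rw [← hsk] at hv1; exact hv1,
      by rw [← hsk] at hv2; exact hv2⟩
  have hL := pvLoop n ms.1 ms.2 (PySem.List.enumerate stones 0)
    ((List.range n).map (fun k => Int.ofNat k)) (n : Int)
    ((List.range n).map (fun k => Int.ofNat k)) (pvInit n) hes
  obtain ⟨_, _, _, _, hcc⟩ := hL
  rw [hcc, pvSetLen]
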